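-- pv_equiv track=rewrite | github.com/davidar/oeisdata | verified/prog/Python/A020/A020344.py | aupton
-- ===== SOURCE A (Python) =====
-- def aupton(nn):
--     ans, f, g, k = dict(), 0, 1, 0
--     while len(ans) < nn+1:
--         sf = str(f)
--         for i in range(1, len(sf)+1):
--             if int(sf[:i]) > nn:
--                 break
--             if sf[:i] not in ans:
--                 ans[sf[:i]] = k
--         f, g, k = g, f+g, k+1
--     return [int(ans[str(i)]) for i in range(nn+1)]
-- ===== SOURCE B (Python) =====
-- def aupton(nn):
--     fibs = []          # str(fib(k)) cache, grown lazily; fib state advances with it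
--     f, g = 0, 1
--     res = []
--     for i in range(nn + 1):
--         s = str(i)
--         k = 0
--         while True:
--             if k == len(fibs):
--                 fibs.append(str(f))
--                 f, g = g, f + g
--             if fibs[k].startswith(s):
--                 break
--             k += 1
--         res.append(k)
--     return res
-- ===== Notes on version B (the rewrite author's own statement) =====
-- stated objective: simpler
-- what changed: A runs one shared Fibonacci sweep that parses every decimal prefix of str(f), records prefix->first-index in a dict and stops when the dict holds nn+1 keys; B has no dict, no prefix parsing and no counting: for each target i in 0..nn it scans the Fibonacci strings from k=0 (memoized in a lazily grown list) until str(fib(k)).startswith(str(i)).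
import Mathlib
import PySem

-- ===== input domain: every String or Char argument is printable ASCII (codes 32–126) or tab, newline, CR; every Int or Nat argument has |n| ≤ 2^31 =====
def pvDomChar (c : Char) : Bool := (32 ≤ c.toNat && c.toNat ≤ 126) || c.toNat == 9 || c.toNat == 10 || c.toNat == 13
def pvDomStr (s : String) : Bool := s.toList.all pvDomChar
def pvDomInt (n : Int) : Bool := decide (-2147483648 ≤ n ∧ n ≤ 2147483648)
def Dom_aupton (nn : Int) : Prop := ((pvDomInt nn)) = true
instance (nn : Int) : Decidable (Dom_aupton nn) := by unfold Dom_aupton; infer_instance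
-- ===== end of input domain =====

-- B replaces A's shared one-sweep prefix→first-index dictionary with an independent
-- Fibonacci rescan per target i (simpler: no dict, no prefix bookkeeping, no early-exit count).

-- ===== PORT A =====

-- int(s) for the nonempty all-digit strings A slices from str(f) (exact on those: no sign,
-- no whitespace, no underscores); ported by hand because PySem.Int.ofStr?'s parser core is
-- private to the prelude and proofs below need the value of int() on these digit slices.
def pvDigitsVal (cs : List Char) : Nat := cs.foldl (fun a c => 10 * a + (c.toNat - 48)) 0

def pvIntOfDigits (s : String) : Int := (pvDigitsVal s.toList : Nat)

-- the inner 'for i in range(1, len(sf)+1)' with its break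
def auptonPref (nn : Int) (sf : String) (k : Int) (ans : PySem.Dict String Int) :
    List Int → PySem.Dict String Int
  | [] => ans
  | i :: rest =>
    let p := PySem.Str.slice sf none (some i)
    if pvIntOfDigits p > nn then ans
    else auptonPref nn sf k (if ans.contains p then ans else ans.insert p k) rest

-- the outer 'while len(ans) < nn+1' loop; fuel 20578 is the exact iteration at which CPython
-- raises ValueError (str(f) for f = fib(20578) ≥ 10^4300 exceeds the 4300-digit int→str limit),
-- so wherever Python A returns the fuel branch is never reached
def auptonLoop (nn : Int) (ans : PySem.Dict String Int) (f g k : Int) :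
    Nat → PySem.Dict String Int
  | 0 => ans
  | fuel + 1 =>
    if (ans.size : Int) < nn + 1 then
      let sf := PySem.Int.toStr f
      auptonLoop nn (auptonPref nn sf k ans (PySem.List.pyRange 1 (PySem.Str.len sf + 1) 1))
        g (f + g) (k + 1) fuel
    else ans

def aupton (nn : Int) : List Int :=
  let ans := auptonLoop nn PySem.Dict.empty 0 1 0 20578
  -- int(ans[str(i)]) : the stored value is already an int; the key is present whenever the
  -- loop above exited with a full dict (i.e. wherever Python A returns)
  (PySem.List.pyRange 0 (nn + 1) 1).map (fun i => ans.getD (PySem.Int.toStr i) 0)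

-- ===== PORT B =====

-- the inner 'while True' scan: ensure the cache holds str(fib(k)) (growing it and advancing
-- the f,g state), test startswith, else k += 1; fuel 20578 as in port A: the iteration at
-- which CPython's str(f) raises ValueError (never reached where Python B returns)
def auptonFind (s : String) : Nat → List String → Int → Int → Int → (List String × Int × Int) × Int
  | 0, fibs, f, g, _ => ((fibs, f, g), 0)
  | fuel + 1, fibs, f, g, k =>
    match (if k == PySem.List.len fibs then (fibs ++ [PySem.Int.toStr f], g, f + g)
           else (fibs, f, g)) with
    | (fibs, f, g) =>
      -- fibs[k]: k ≤ len(fibs) is a loop invariant, so after the growth step the index is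
      -- always in range and the pyGetD default is never taken
      if PySem.Str.startswith (PySem.List.pyGetD fibs k "") s then ((fibs, f, g), k)
      else auptonFind s fuel fibs f g (k + 1)

-- 'for i in range(nn + 1)' carrying the shared cache and accumulating res
def auptonAll : List Int → List String → Int → Int → List Int → List Int
  | [], _, _, _, res => res
  | i :: rest, fibs, f, g, res =>
    match auptonFind (PySem.Int.toStr i) 20578 fibs f g 0 with
    | ((fibs, f, g), k) => auptonAll rest fibs f g (res ++ [k])

def aupton_alt (nn : Int) : List Int :=
  auptonAll (PySem.List.pyRange 0 (nn + 1) 1) [] 0 1 []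

-- ===== PRECONDITION & SPEC =====
def Spec_aupton (nn : Int) (out : List Int) : Prop := out = aupton_alt nn
instance (nn : Int) (out : List Int) : Decidable (Spec_aupton nn out) := by
  unfold Spec_aupton; infer_instance

-- ===== CLAIM (what is proved, stated in full; the proofs are below) =====
def Claim_equal_aupton : Prop := ∀ (nn : Int), Dom_aupton nn → Spec_aupton nn (aupton nn)

-- ===== LEMMAS AND PROOFS =====

-- Fibonacci as both loops generate it
def pvFib : Nat → Int
  | 0 => 0
  | 1 => 1
  | n + 2 => pvFib n + pvFib (n + 1)

-- 'str(fib t).startswith(s)'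
def pvHit (s : String) (t : Nat) : Bool :=
  PySem.Str.startswith (PySem.Int.toStr (pvFib t)) s

-- first index x with j ≤ x < j + fuel and pvHit s x
def pvFirst (s : String) (j : Nat) : Nat → Option Nat
  | 0 => none
  | fuel + 1 => if pvHit s j then some j else pvFirst s (j + 1) fuel

def pvCanon (ds : List Char) : Prop :=
  ds ≠ [] ∧ (∀ c ∈ ds, c.isDigit = true) ∧ (ds.head? = some '0' → ds = ['0'])

theorem pvFib_nonneg : ∀ n, 0 ≤ pvFib n := by
  have h : ∀ n, 0 ≤ pvFib n ∧ 0 ≤ pvFib (n + 1) := by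
    intro n
    induction n with
    | zero => exact ⟨le_refl _, by norm_num [pvFib]⟩
    | succ n ih => exact ⟨ih.2, by have := ih.1; have := ih.2; simp only [pvFib]; omega⟩
  exact fun n => (h n).1

theorem pvVal_acc (cs : List Char) : ∀ a : Nat,
    cs.foldl (fun a c => 10 * a + (c.toNat - 48)) a
      = a * 10 ^ cs.length + pvDigitsVal cs := by
  induction cs with
  | nil => intro a; simp [pvDigitsVal]
  | cons c cs ih =>
    intro a
    simp only [List.foldl_cons, List.length_cons, pvDigitsVal] at *
    rw [ih (10 * a + (c.toNat - 48)), ih (10 * 0 + (c.toNat - 48))]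
    ring

theorem pvVal_append (xs ys : List Char) :
    pvDigitsVal (xs ++ ys) = pvDigitsVal xs * 10 ^ ys.length + pvDigitsVal ys := by
  simp only [pvDigitsVal, List.foldl_append]
  rw [pvVal_acc ys (xs.foldl (fun a c => 10 * a + (c.toNat - 48)) 0)]
  rfl

theorem pvVal_take_mono (cs : List Char) {a b : Nat} (h : a ≤ b) :
    pvDigitsVal (cs.take a) ≤ pvDigitsVal (cs.take b) := by
  have heq : cs.take b = cs.take a ++ ((cs.drop a).take (b - a)) := by
    rw [← List.take_add]; congr 1; omega
  rw [heq, pvVal_append]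
  have h1 : 1 ≤ 10 ^ ((cs.drop a).take (b - a)).length := Nat.one_le_pow _ _ (by norm_num)
  calc pvDigitsVal (cs.take a) = pvDigitsVal (cs.take a) * 1 := by ring
    _ ≤ _ := by exact Nat.le_add_right_of_le (Nat.mul_le_mul_left _ h1)

theorem pvVal_toDigits (m : Nat) : pvDigitsVal (Nat.toDigits 10 m) = m := by
  induction m using Nat.strong_induction_on with
  | _ m ih =>
    rw [Nat.toDigits_eq_if (by norm_num)]
    by_cases h : m < 10
    · simp only [if_pos h, pvDigitsVal, List.foldl_cons, List.foldl_nil]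
      have : (Nat.digitChar m).toNat = m + 48 := by interval_cases m <;> decide
      omega
    · rw [if_neg h, pvVal_append]
      have hd : m / 10 < m := Nat.div_lt_self (by omega) (by norm_num)
      rw [ih _ hd]
      have hlt : m % 10 < 10 := Nat.mod_lt _ (by norm_num)
      have : (Nat.digitChar (m % 10)).toNat = m % 10 + 48 := by
        set r := m % 10 with hr
        interval_cases r <;> decide
      simp only [pvDigitsVal, List.foldl_cons, List.foldl_nil, List.length_cons, List.length_nil]
      rw [this]
      omega
theorem pvDigitChar_roundtrip {c : Char} (h : c.isDigit = true) :
    Nat.digitChar (c.toNat - 48) = c := by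
  have h1 : 48 ≤ c.toNat ∧ c.toNat ≤ 57 := by
    simp [Char.isDigit] at h
    exact ⟨h.1, h.2⟩
  have h2 : c.toNat - 48 < 10 := by omega
  have : c = Char.ofNat c.toNat := by simp [Char.ofNat_toNat]
  rw [this]
  set d := c.toNat - 48 with hd
  have : c.toNat = d + 48 := by omega
  rw [this]
  interval_cases d <;> decide
theorem pvCanon_prefix {p cs : List Char} (hc : pvCanon cs) (hp : p <+: cs) (hne : p ≠ []) :
    pvCanon p := by
  obtain ⟨hcne, hdig, hz⟩ := hc
  refine ⟨hne, fun c hcmem => hdig c (hp.subset hcmem), ?_⟩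
  intro hh
  obtain ⟨c, p', rfl⟩ := List.exists_cons_of_ne_nil hne
  simp at hh; subst hh
  obtain ⟨t, ht⟩ := hp
  have hcs0 : cs = ['0'] := hz (by rw [← ht]; simp)
  rw [hcs0] at ht
  simp at ht
  rw [ht.1]

theorem pvVal_pos {d : Char} {rest : List Char} (hd : d.isDigit = true) (h0 : d ≠ '0') :
    1 ≤ pvDigitsVal (d :: rest) := by
  have h48 : 48 ≤ d.toNat ∧ d.toNat ≤ 57 := by
    simp [Char.isDigit] at hd; exact ⟨hd.1, hd.2⟩
  have h49 : 49 ≤ d.toNat := by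
    by_contra hlt
    apply h0
    have h1 : d.toNat = 48 := by omega
    have h2 : d = Char.ofNat 48 := by rw [← h1]; simp [Char.ofNat_toNat]
    rw [h2]
  have heq : (d :: rest) = [d] ++ rest := rfl
  rw [heq, pvVal_append]
  have hv : 1 ≤ pvDigitsVal [d] := by simp [pvDigitsVal]; omega
  have hp : 1 ≤ 10 ^ rest.length := Nat.one_le_pow _ _ (by norm_num)
  calc 1 = 1 * 1 := rfl
    _ ≤ pvDigitsVal [d] * 10 ^ rest.length := Nat.mul_le_mul hv hp
    _ ≤ _ := Nat.le_add_right _ _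
theorem pvToDigits_head {m : Nat} (h : 1 ≤ m) :
    ∃ c cs, Nat.toDigits 10 m = c :: cs ∧ c ≠ '0' := by
  induction m using Nat.strong_induction_on with
  | _ m ih =>
    rw [Nat.toDigits_eq_if (by norm_num)]
    by_cases hl : m < 10
    · rw [if_pos hl]
      refine ⟨m.digitChar, [], rfl, by interval_cases m <;> decide⟩
    · rw [if_neg hl]
      have hd : m / 10 < m := Nat.div_lt_self (by omega) (by norm_num)
      obtain ⟨c, cs, hcs, hc0⟩ := ih _ hd (by omega)
      exact ⟨c, cs ++ [(m % 10).digitChar], by rw [hcs]; simp, hc0⟩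

theorem pvCanon_toDigits (m : Nat) : pvCanon (Nat.toDigits 10 m) := by
  refine ⟨?_, fun c hc => Nat.isDigit_of_mem_toDigits (by norm_num) (by norm_num) hc, ?_⟩
  · have := @Nat.length_toDigits_pos 10 m
    intro h; rw [h] at this; simp at this
  · intro hh
    rcases Nat.eq_zero_or_pos m with hm | hm
    · subst hm; rw [Nat.toDigits_zero]
    · obtain ⟨c, cs, hcs, hc0⟩ := pvToDigits_head hm
      rw [hcs] at hh; simp at hh; exact absurd hh hc0


theorem pvToDigits_canon : ∀ {ds : List Char}, pvCanon ds →
    Nat.toDigits 10 (pvDigitsVal ds) = ds := by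
  intro ds
  induction ds using List.reverseRecOn with
  | nil => intro h; exact absurd rfl h.1
  | append_singleton xs c ih =>
    intro ⟨hne, hdig, hz⟩
    have hcd : c.isDigit = true := hdig c (by simp)
    have hcv : 48 ≤ c.toNat ∧ c.toNat ≤ 57 := by
      simp [Char.isDigit] at hcd; exact ⟨hcd.1, hcd.2⟩
    have hcd' : c.isDigit = true := hdig c (by simp)
    rcases List.eq_nil_or_concat xs with hxs | _
    · subst hxs
      simp only [List.nil_append]
      have hv1 : pvDigitsVal [c] = c.toNat - 48 := by simp [pvDigitsVal]
      rw [hv1, Nat.toDigits_of_lt_base (by omega), pvDigitChar_roundtrip hcd']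
    · have hxne : xs ≠ [] := by rintro rfl; simp_all
      obtain ⟨d, xs', rfl⟩ := List.exists_cons_of_ne_nil hxne
      have hd0 : d ≠ '0' := by
        intro h
        subst h
        have h1 := hz (by simp)
        have := congrArg List.length h1; simp at this
      have hxcanon : pvCanon (d :: xs') := by
        exact ⟨hxne, fun e he => hdig e (by simp at he ⊢; tauto), by intro hh; simp at hh; exact absurd hh hd0⟩
      have hxpos : 1 ≤ pvDigitsVal (d :: xs') := pvVal_pos (hdig d (by simp)) hd0
      have hval : pvDigitsVal ((d :: xs') ++ [c]) = 10 * pvDigitsVal (d :: xs') + (c.toNat - 48) := by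
        rw [pvVal_append]; simp [pvDigitsVal]; ring
      rw [hval, Nat.toDigits_eq_if (by norm_num), if_neg (by omega)]
      have hdiv : (10 * pvDigitsVal (d :: xs') + (c.toNat - 48)) / 10 = pvDigitsVal (d :: xs') := by omega
      have hmod : (10 * pvDigitsVal (d :: xs') + (c.toNat - 48)) % 10 = c.toNat - 48 := by omega
      rw [hdiv, hmod, ih hxcanon, pvDigitChar_roundtrip hcd']

theorem pvToChars_natCast (j : Nat) : PySem.Int.toChars (j : Int) = Nat.toDigits 10 j := by
  simp [PySem.Int.toChars]

theorem pvToStr_inj {a b : Nat} (h : PySem.Int.toStr (a : Int) = PySem.Int.toStr (b : Int)) :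
    a = b := by
  have h2 : PySem.Int.toChars (a : Int) = PySem.Int.toChars (b : Int) := by
    rw [← PySem.Int.toList_toStr, ← PySem.Int.toList_toStr, h]
  rw [pvToChars_natCast, pvToChars_natCast] at h2
  calc a = pvDigitsVal (Nat.toDigits 10 a) := (pvVal_toDigits a).symm
    _ = pvDigitsVal (Nat.toDigits 10 b) := by rw [h2]
    _ = b := pvVal_toDigits b
theorem pvFirst_succ (s : String) (n : Nat) : ∀ j, pvFirst s j (n + 1) =
    match pvFirst s j n with
    | some x => some x
    | none => if pvHit s (j + n) then some (j + n) else none := by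
  induction n with
  | zero => intro j; simp [pvFirst]
  | succ n ih =>
    intro j
    by_cases h : pvHit s j
    · simp [pvFirst, h]
    · have h1 : pvFirst s j (n + 1 + 1) = pvFirst s (j + 1) (n + 1) := by
        simp [pvFirst, h]
      have h2 : pvFirst s j (n + 1) = pvFirst s (j + 1) n := by
        simp [pvFirst, h]
      rw [h1, ih (j + 1), h2]
      have : j + 1 + n = j + (n + 1) := by omega
      rw [this]

theorem pvFirst_mono {s : String} {j n x : Nat} (h : pvFirst s j n = some x) : ∀ (d : Nat),
    pvFirst s j (n + d) = some x := by
  intro d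
  induction d with
  | zero => exact h
  | succ d ih => rw [← Nat.add_assoc, pvFirst_succ, ih]

-- ---- B-side characterisation ----

def pvSt (n : Nat) : List String := (List.range n).map (fun t => PySem.Int.toStr (pvFib t))

theorem pvSt_len (n : Nat) : PySem.List.len (pvSt n) = (n : Int) := by
  simp [PySem.List.len_eq, pvSt]

theorem pvSt_succ (n : Nat) : pvSt (n + 1) = pvSt n ++ [PySem.Int.toStr (pvFib n)] := by
  simp [pvSt, List.range_succ]

theorem pvSt_get {k n : Nat} (h : k < n) :
    PySem.List.pyGetD (pvSt n) (k : Int) "" = PySem.Int.toStr (pvFib k) := by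
  rw [PySem.List.pyGetD_natCast]
  rw [pvSt, List.getD_eq_getElem?_getD]
  simp [h]

theorem pvFirst_ge {s : String} : ∀ {fuel j x : Nat}, pvFirst s j fuel = some x → j ≤ x := by
  intro fuel
  induction fuel with
  | zero => intro j x h; simp [pvFirst] at h
  | succ fuel ih =>
    intro j x h
    rw [pvFirst] at h
    split at h
    · cases h; omega
    · have := ih h; omega

theorem pvFind_eq (s : String) : ∀ (fuel k n : Nat), k ≤ n →
    auptonFind s fuel (pvSt n) (pvFib n) (pvFib (n + 1)) (k : Int)
      = match pvFirst s k fuel with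
        | some x => ((pvSt (max n (x + 1)), pvFib (max n (x + 1)), pvFib (max n (x + 1) + 1)), (x : Int))
        | none => ((pvSt (max n (k + fuel)), pvFib (max n (k + fuel)), pvFib (max n (k + fuel) + 1)), 0) := by
  intro fuel
  induction fuel with
  | zero =>
    intro k n hkn
    simp only [auptonFind, pvFirst]
    have : max n (k + 0) = n := by omega
    rw [this]
  | succ fuel ih =>
    intro k n hkn
    rcases Nat.eq_or_lt_of_le hkn with heq | hlt
    · -- k = n : append
      subst heq
      have hbeq : ((k : Int) == PySem.List.len (pvSt k)) = true := by
        rw [pvSt_len]; simp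
      have hst : (if (k : Int) == PySem.List.len (pvSt k)
            then (pvSt k ++ [PySem.Int.toStr (pvFib k)], pvFib (k + 1), pvFib k + pvFib (k + 1))
            else (pvSt k, pvFib k, pvFib (k + 1)))
          = (pvSt (k + 1), pvFib (k + 1), pvFib (k + 1 + 1)) := by
        rw [if_pos hbeq, pvSt_succ]
        rfl
      rw [auptonFind, hst]
      have hget : PySem.List.pyGetD (pvSt (k + 1)) (k : Int) "" = PySem.Int.toStr (pvFib k) :=
        pvSt_get (by omega)
      show (if PySem.Str.startswith (PySem.List.pyGetD (pvSt (k + 1)) (k : Int) "") s = true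
          then ((pvSt (k + 1), pvFib (k + 1), pvFib (k + 1 + 1)), (k : Int))
          else auptonFind s fuel (pvSt (k + 1)) (pvFib (k + 1)) (pvFib (k + 1 + 1)) ((k : Int) + 1)) = _
      rw [hget]
      by_cases hh : pvHit s k
      · rw [pvHit] at hh
        rw [if_pos hh]
        rw [pvFirst, if_pos (by rw [pvHit]; exact hh)]
        simp
      · rw [pvHit] at hh
        rw [if_neg hh]
        have hkc : (k : Int) + 1 = ((k + 1 : Nat) : Int) := by push_cast; ring
        rw [hkc, ih (k + 1) (k + 1) (le_refl _)]
        rw [pvFirst, if_neg (by rw [pvHit]; exact hh)]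
        cases hfc : pvFirst s (k + 1) fuel with
        | some x =>
          have hx := pvFirst_ge hfc
          have h1 : max (k + 1) (x + 1) = max k (x + 1) := by omega
          simp [h1]
        | none =>
          have h2 : k + 1 + fuel = k + (fuel + 1) := by omega
          simp [h2]
    · -- k < n : no append
      have hlen2 : (pvSt n).length = n := by simp [pvSt]
      have hbeq : ((k : Int) == PySem.List.len (pvSt n)) = false := by
        rw [pvSt_len]
        simp only [beq_eq_false_iff_ne, ne_eq, Nat.cast_inj]
        omega
      have hst : (if (k : Int) == PySem.List.len (pvSt n)
            then (pvSt n ++ [PySem.Int.toStr (pvFib n)], pvFib (n + 1), pvFib n + pvFib (n + 1))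
            else (pvSt n, pvFib n, pvFib (n + 1)))
          = (pvSt n, pvFib n, pvFib (n + 1)) := by
        rw [if_neg (by rw [hbeq]; simp)]
      rw [auptonFind, hst]
      show (if PySem.Str.startswith (PySem.List.pyGetD (pvSt n) (k : Int) "") s = true
          then ((pvSt n, pvFib n, pvFib (n + 1)), (k : Int))
          else auptonFind s fuel (pvSt n) (pvFib n) (pvFib (n + 1)) ((k : Int) + 1)) = _
      rw [pvSt_get hlt]
      by_cases hh : pvHit s k
      · rw [pvHit] at hh
        rw [if_pos hh, pvFirst, if_pos (by rw [pvHit]; exact hh)]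
        have hmx : max n (k + 1) = n := by omega
        simp [hmx]
      · rw [pvHit] at hh
        rw [if_neg hh]
        have hkc : (k : Int) + 1 = ((k + 1 : Nat) : Int) := by push_cast; ring
        rw [hkc, ih (k + 1) n (by omega)]
        rw [pvFirst, if_neg (by rw [pvHit]; exact hh)]
        cases hfc : pvFirst s (k + 1) fuel with
        | some x => rfl
        | none =>
          have h1 : max n (k + 1 + fuel) = max n (k + (fuel + 1)) := by omega
          simp [h1]

theorem pvAll_eq : ∀ (is : List Int) (n : Nat) (res : List Int),
    auptonAll is (pvSt n) (pvFib n) (pvFib (n + 1)) res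
      = res ++ is.map (fun i => ((pvFirst (PySem.Int.toStr i) 0 20578).map Int.ofNat).getD 0) := by
  intro is
  induction is with
  | nil => intro n res; simp [auptonAll]
  | cons i rest ih =>
    intro n res
    rw [auptonAll]
    have hfind := pvFind_eq (PySem.Int.toStr i) 20578 0 n (by omega)
    rw [show ((0 : Nat) : Int) = (0 : Int) from rfl] at hfind
    rw [hfind]
    cases hfc : pvFirst (PySem.Int.toStr i) 0 20578 with
    | some x =>
      simp only
      rw [ih (max n (x + 1)) (res ++ [(x : Int)])]
      simp [hfc]
    | none =>
      simp only
      rw [ih (max n (0 + 20578)) (res ++ [(0 : Int)])]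
      simp [hfc]

-- slice fact
theorem pvSlice_toList (s : String) (a : Nat) :
    (PySem.Str.slice s none (some (a : Int))).toList = s.toList.take a := by
  rw [PySem.Str.toList_slice]
  simp [PySem.Chars.slice_eq_listSlice]

theorem pvRange_nil {a b : Int} (h : b ≤ a) : PySem.List.pyRange a b 1 = [] := by
  rw [List.eq_nil_iff_forall_not_mem]
  intro x hx
  rw [PySem.List.mem_pyRange_one] at hx
  omega

theorem pvPref_spec (nn : Int) (m : Nat) (k : Int) :
    ∀ (b a : Nat) (ans : PySem.Dict String Int), 1 ≤ a →
    a + b = (PySem.Int.toChars (m : Int)).length + 1 →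
    ans.keys.Nodup →
    (∀ j : Nat, (j : Int) ≤ nn → PySem.Int.toChars (j : Int) <+: PySem.Int.toChars (m : Int) →
      a ≤ (PySem.Int.toChars (j : Int)).length →
      ans.contains (PySem.Int.toStr (j : Int)) = false →
      (auptonPref nn (PySem.Int.toStr (m : Int)) k ans
          (PySem.List.pyRange (a : Int) (((PySem.Int.toChars (m : Int)).length : Int) + 1) 1)).get?
        (PySem.Int.toStr (j : Int)) = some k)
    ∧ (∀ key : String,
        (∀ j : Nat, (j : Int) ≤ nn → PySem.Int.toChars (j : Int) <+: PySem.Int.toChars (m : Int) →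
          a ≤ (PySem.Int.toChars (j : Int)).length →
          ans.contains (PySem.Int.toStr (j : Int)) = false → key ≠ PySem.Int.toStr (j : Int)) →
        (auptonPref nn (PySem.Int.toStr (m : Int)) k ans
            (PySem.List.pyRange (a : Int) (((PySem.Int.toChars (m : Int)).length : Int) + 1) 1)).get?
          key = ans.get? key)
    ∧ (∀ key ∈ (auptonPref nn (PySem.Int.toStr (m : Int)) k ans
          (PySem.List.pyRange (a : Int) (((PySem.Int.toChars (m : Int)).length : Int) + 1) 1)).keys,
        key ∈ ans.keys ∨ ∃ j : Nat, (j : Int) ≤ nn ∧ key = PySem.Int.toStr (j : Int))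
    ∧ (auptonPref nn (PySem.Int.toStr (m : Int)) k ans
        (PySem.List.pyRange (a : Int) (((PySem.Int.toChars (m : Int)).length : Int) + 1) 1)).keys.Nodup := by
  set cs := PySem.Int.toChars (m : Int) with hcs
  set L := cs.length with hL
  intro b
  induction b with
  | zero =>
    intro a ans ha1 hab hnd
    have hr : PySem.List.pyRange (a : Int) ((L : Int) + 1) 1 = [] := by
      apply pvRange_nil; omega
    rw [hr]
    refine ⟨?_, fun key _ => rfl, fun key hk => Or.inl hk, hnd⟩
    intro j _ hpre hlen _
    exfalso
    have := hpre.length_le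
    omega
  | succ b ih =>
    intro a ans ha1 hab hnd
    have haL : a ≤ L := by omega
    have hr : PySem.List.pyRange (a : Int) ((L : Int) + 1) 1
        = (a : Int) :: PySem.List.pyRange ((a : Int) + 1) ((L : Int) + 1) 1 := by
      apply PySem.List.pyRange_one_cons; omega
    have hcast : ((a : Int) + 1) = ((a + 1 : Nat) : Int) := by push_cast; ring
    -- the sliced prefix
    set p := PySem.Str.slice (PySem.Int.toStr (m : Int)) none (some (a : Int)) with hpdef
    have hptl : p.toList = cs.take a := by
      rw [hpdef, pvSlice_toList, PySem.Int.toList_toStr]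
    have hptlen : (cs.take a).length = a := by
      rw [List.length_take]; omega
    have hunfold : ∀ (d : PySem.Dict String Int) (rest : List Int),
        auptonPref nn (PySem.Int.toStr (m : Int)) k d ((a : Int) :: rest)
        = if pvIntOfDigits p > nn then d
          else auptonPref nn (PySem.Int.toStr (m : Int)) k
            (if d.contains p then d else d.insert p k) rest := by
      intro d rest; rfl
    by_cases hv : pvIntOfDigits p > nn
    · -- break: nothing changes
      rw [hr, hunfold, if_pos hv]
      refine ⟨?_, fun key _ => rfl, fun key hk => Or.inl hk, hnd⟩
      intro j hjn hpre hlen _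
      exfalso
      have hjtake : PySem.Int.toChars (j : Int) = cs.take (PySem.Int.toChars (j : Int)).length := by
        exact List.prefix_iff_eq_take.mp hpre
      have hjval : pvDigitsVal (PySem.Int.toChars (j : Int)) = j := by
        rw [pvToChars_natCast, pvVal_toDigits]
      have hmono : pvDigitsVal (cs.take a) ≤ j := by
        rw [← hjval, hjtake]; exact pvVal_take_mono cs hlen
      rw [pvIntOfDigits, hptl] at hv
      have : (pvDigitsVal (cs.take a) : Int) ≤ (j : Int) := by exact_mod_cast hmono
      omega
    · -- process prefix p, maybe insert, recurse
      have hvle : (pvDigitsVal (cs.take a) : Int) ≤ nn := by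
        rw [pvIntOfDigits, hptl] at hv; omega
      -- canonical facts about p
      have hcscanon : pvCanon cs := by rw [hcs, pvToChars_natCast]; exact pvCanon_toDigits m
      have hpne : cs.take a ≠ [] := by
        intro h; have := congrArg List.length h; rw [hptlen] at this; simp at this; omega
      have hpcanon : pvCanon (cs.take a) := pvCanon_prefix hcscanon (List.take_prefix a cs) hpne
      set v := pvDigitsVal (cs.take a) with hvdef
      have hvchars : PySem.Int.toChars (v : Int) = cs.take a := by
        rw [pvToChars_natCast, pvToDigits_canon hpcanon]
      have hpstr : p = PySem.Int.toStr (v : Int) := by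
        apply String.toList_inj.mp
        rw [hptl, PySem.Int.toList_toStr, hvchars]
      have hvlen : (PySem.Int.toChars (v : Int)).length = a := by rw [hvchars, hptlen]
      set ans1 := if ans.contains p then ans else ans.insert p k with hans1
      have hnd1 : ans1.keys.Nodup := by
        rw [hans1]; split
        · exact hnd
        · exact PySem.Dict.nodup_keys_insert ans p k hnd
      have hfresh_down : ∀ key, ans1.contains key = false → ans.contains key = false := by
        intro key h
        rw [hans1] at h; split at h
        · exact h
        · rw [PySem.Dict.contains_insert] at h
          simp at h; exact h.2
      obtain ⟨IH1, IH2, IH3, IH4⟩ := ih (a + 1) ans1 (by omega) (by omega) hnd1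
      have hr' : PySem.List.pyRange (a : Int) ((L : Int) + 1) 1
          = (a : Int) :: PySem.List.pyRange ((a + 1 : Nat) : Int) ((L : Int) + 1) 1 := by
        rw [hr, hcast]
      have hgoalrw : auptonPref nn (PySem.Int.toStr (m : Int)) k ans
          (PySem.List.pyRange (a : Int) ((L : Int) + 1) 1)
          = auptonPref nn (PySem.Int.toStr (m : Int)) k ans1
            (PySem.List.pyRange ((a + 1 : Nat) : Int) ((L : Int) + 1) 1) := by
        rw [hr', hunfold ans, if_neg hv]
      rw [hgoalrw]
      refine ⟨?_, ?_, ?_, IH4⟩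
      · -- G1
        intro j hjn hpre hlen hfresh
        rcases Nat.lt_or_ge (PySem.Int.toChars (j : Int)).length (a + 1) with hsh | hlong
        · -- length = a : the key is exactly p, inserted now
          have hlenj : (PySem.Int.toChars (j : Int)).length = a := by omega
          have hjtake : PySem.Int.toChars (j : Int) = cs.take a := by
            have := List.prefix_iff_eq_take.mp hpre
            rw [hlenj] at this; exact this
          have hkeyp : PySem.Int.toStr (j : Int) = p := by
            apply String.toList_inj.mp
            rw [hptl, PySem.Int.toList_toStr, hjtake]
          rw [hkeyp] at hfresh ⊢
          have hnc : ans.contains p = false := hfresh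
          have hans1i : ans1 = ans.insert p k := by rw [hans1, if_neg (by simp [hnc])]
          rw [IH2 p ?_]
          · rw [hans1i, PySem.Dict.get?_insert_self]
          · intro j' _ _ hlen' _ hpe
            have : (PySem.Int.toChars (j' : Int)).length = a := by
              have := congrArg String.toList hpe
              rw [hptl, PySem.Int.toList_toStr] at this
              have := congrArg List.length this
              rw [hptlen] at this; omega
            omega
        · -- longer target: recurse
          apply IH1 j hjn hpre hlong
          rw [hans1]; split
          · exact hfresh
          · rw [PySem.Dict.contains_insert]
            have hne : PySem.Int.toStr (j : Int) ≠ p := by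
              intro hpe
              have := congrArg String.toList hpe
              rw [hptl, PySem.Int.toList_toStr] at this
              have := congrArg List.length this
              rw [hptlen] at this; omega
            simp [hne, hfresh]
      · -- G2
        intro key H
        have hstep : (auptonPref nn (PySem.Int.toStr (m : Int)) k ans1
            (PySem.List.pyRange ((a + 1 : Nat) : Int) ((L : Int) + 1) 1)).get? key
            = ans1.get? key := by
          apply IH2
          intro j' hjn' hpre' hlen' hfresh'
          exact H j' hjn' hpre' (by omega) (hfresh_down _ hfresh')
        rw [hstep, hans1]
        split
        · rfl
        · rename_i hnc
          simp at hnc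
          apply PySem.Dict.get?_insert_of_ne
          rw [hpstr]
          apply H v hvle
          · rw [hvchars]; exact List.take_prefix a cs
          · omega
          · rw [← hpstr]; exact hnc
      · -- G3
        intro key hk
        rcases IH3 key hk with h1 | h2
        · rw [hans1] at h1
          split at h1
          · exact Or.inl h1
          · rw [PySem.Dict.mem_keys_insert] at h1
            rcases h1 with rfl | h1
            · exact Or.inr ⟨v, hvle, hpstr⟩
            · exact Or.inl h1
        · exact Or.inr h2
def pvInv (nn : Int) (t : Nat) (d : PySem.Dict String Int) : Prop :=
  d.keys.Nodup
  ∧ (∀ key ∈ d.keys, ∃ j : Nat, (j : Int) ≤ nn ∧ key = PySem.Int.toStr (j : Int))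
  ∧ (∀ j : Nat, (j : Int) ≤ nn →
      d.get? (PySem.Int.toStr (j : Int))
        = (pvFirst (PySem.Int.toStr (j : Int)) 0 t).map Int.ofNat)

theorem pvHit_iff (j : Nat) (t : Nat) :
    pvHit (PySem.Int.toStr (j : Int)) t = true
      ↔ PySem.Int.toChars (j : Int) <+: PySem.Int.toChars (pvFib t) := by
  rw [pvHit, PySem.Str.startswith, PySem.Chars.startswith_iff]
  rw [PySem.Int.toList_toStr, PySem.Int.toList_toStr]

theorem pvToChars_ne_nil (j : Nat) : (PySem.Int.toChars (j : Int)) ≠ [] := by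
  rw [pvToChars_natCast]
  intro h
  have := @Nat.length_toDigits_pos 10 j
  rw [h] at this; simp at this

theorem pvKeys_length (d : PySem.Dict String Int) : d.keys.length = d.size := by
  cases d
  simp [PySem.Dict.keys, PySem.Dict.size]

theorem pvPigeon {nn : Int} {d : PySem.Dict String Int} (hnd : d.keys.Nodup)
    (hsub : ∀ key ∈ d.keys, ∃ j : Nat, (j : Int) ≤ nn ∧ key = PySem.Int.toStr (j : Int))
    (hsz : nn + 1 ≤ (d.size : Int)) {j : Nat} (hj : (j : Int) ≤ nn) :
    PySem.Int.toStr (j : Int) ∈ d.keys := by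
  have hnn : 0 ≤ nn := le_trans (by positivity) hj
  set T : List String := (List.range (nn.toNat + 1)).map (fun (j : Nat) => PySem.Int.toStr (j : Int)) with hT
  have hTnd : T.Nodup := by
    refine List.Nodup.map ?_ (List.nodup_range)
    intro a b hab
    exact pvToStr_inj hab
  have hsubF : d.keys.toFinset ⊆ T.toFinset := by
    intro key hk
    rw [List.mem_toFinset] at hk ⊢
    obtain ⟨j', hj', rfl⟩ := hsub key hk
    rw [hT]
    apply List.mem_map_of_mem
    rw [List.mem_range]
    omega
  have hcardk : d.keys.toFinset.card = d.keys.length := List.toFinset_card_of_nodup hnd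
  have hcardT : T.toFinset.card = nn.toNat + 1 := by
    rw [List.toFinset_card_of_nodup hTnd, hT, List.length_map, List.length_range]
  have hle : T.toFinset.card ≤ d.keys.toFinset.card := by
    rw [hcardk, hcardT, pvKeys_length]
    omega
  have heq : d.keys.toFinset = T.toFinset := Finset.eq_of_subset_of_card_le hsubF hle
  have : PySem.Int.toStr (j : Int) ∈ T.toFinset := by
    rw [List.mem_toFinset, hT]
    apply List.mem_map_of_mem
    rw [List.mem_range]; omega
  rw [← heq, List.mem_toFinset] at this
  exact this

theorem pvOuter_spec (nn : Int) : ∀ (fuel t : Nat) (d : PySem.Dict String Int),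
    pvInv nn t d →
    ∀ j : Nat, (j : Int) ≤ nn →
      (auptonLoop nn d (pvFib t) (pvFib (t + 1)) (t : Int) fuel).get? (PySem.Int.toStr (j : Int))
        = (pvFirst (PySem.Int.toStr (j : Int)) 0 (t + fuel)).map Int.ofNat := by
  intro fuel
  induction fuel with
  | zero =>
    intro t d hinv j hj
    simpa [auptonLoop] using hinv.2.2 j hj
  | succ fuel ih =>
    intro t d hinv j hj
    obtain ⟨hnd, hkeys, hget⟩ := hinv
    by_cases hsz : (d.size : Int) < nn + 1
    · -- one more sweep step
      set m : Nat := (pvFib t).toNat with hmdef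
      have hm : (m : Int) = pvFib t := Int.toNat_of_nonneg (pvFib_nonneg t)
      set L : Nat := (PySem.Int.toChars (m : Int)).length with hLdef
      have hsf : PySem.Int.toStr (pvFib t) = PySem.Int.toStr (m : Int) := by rw [hm]
      have hlen : PySem.Str.len (PySem.Int.toStr (m : Int)) = (L : Int) := by
        rw [PySem.Str.len_eq, PySem.Int.toList_toStr]
      have hstep : auptonLoop nn d (pvFib t) (pvFib (t + 1)) (t : Int) (fuel + 1)
          = auptonLoop nn
              (auptonPref nn (PySem.Int.toStr (m : Int)) (t : Int) d
                (PySem.List.pyRange 1 ((L : Int) + 1) 1))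
              (pvFib (t + 1)) (pvFib t + pvFib (t + 1)) ((t : Int) + 1) fuel := by
        simp only [auptonLoop, if_pos hsz, hsf, hlen]
      set d' := auptonPref nn (PySem.Int.toStr (m : Int)) (t : Int) d
          (PySem.List.pyRange 1 ((L : Int) + 1) 1) with hd'
      obtain ⟨G1, G2, G3, G4⟩ := pvPref_spec nn m (t : Int) L 1 d (le_refl 1) (by omega) hnd
      rw [Nat.cast_one] at G1 G2 G3 G4
      have hinv' : pvInv nn (t + 1) d' := by
        refine ⟨G4, ?_, ?_⟩
        · intro key hk
          rcases G3 key hk with h | h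
          · exact hkeys key h
          · exact h
        · intro j' hj'
          by_cases hc : d.contains (PySem.Int.toStr (j' : Int)) = true
          · -- already present: unchanged
            have hsome : (d.get? (PySem.Int.toStr (j' : Int))).isSome := by
              rw [← PySem.Dict.contains_eq_isSome_get?]; exact hc
            obtain ⟨y, hy⟩ := Option.isSome_iff_exists.mp hsome
            have hy' := hget j' hj'
            rw [hy] at hy'
            obtain ⟨x, hx, hxy⟩ := Option.map_eq_some_iff.mp hy'.symm
            have hG2 := G2 (PySem.Int.toStr (j' : Int)) ?_
            · rw [hG2, hy, pvFirst_succ, hx]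
              simp
              exact hxy.symm
            · intro j'' _ _ _ hfresh heq
              have : j' = j'' := pvToStr_inj heq
              subst this
              rw [hc] at hfresh; cases hfresh
          · have hcf : d.contains (PySem.Int.toStr (j' : Int)) = false := by
              simpa using hc
            have hnone : d.get? (PySem.Int.toStr (j' : Int)) = none := by
              have := PySem.Dict.contains_eq_isSome_get? d (PySem.Int.toStr (j' : Int))
              rw [hcf] at this
              exact Option.not_isSome_iff_eq_none.mp (by rw [← this]; simp)
            have hfirstnone : pvFirst (PySem.Int.toStr (j' : Int)) 0 t = none := by
              have := hget j' hj'
              rw [hnone] at this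
              exact (Option.map_eq_none_iff).mp this.symm
            by_cases hh : pvHit (PySem.Int.toStr (j' : Int)) t = true
            · -- found now
              have hpre : PySem.Int.toChars (j' : Int) <+: PySem.Int.toChars (m : Int) := by
                rw [hm]; exact (pvHit_iff j' t).mp hh
              have hlen1 : 1 ≤ (PySem.Int.toChars (j' : Int)).length := by
                have := pvToChars_ne_nil j'
                cases h : PySem.Int.toChars (j' : Int) with
                | nil => exact absurd h this
                | cons c cs => simp
              rw [G1 j' hj' hpre hlen1 hcf]
              rw [pvFirst_succ, hfirstnone]
              simp [hh]
            · -- still absent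
              have hh' : pvHit (PySem.Int.toStr (j' : Int)) t = false := by simpa using hh
              have hG2 := G2 (PySem.Int.toStr (j' : Int)) ?_
              · rw [hG2, hnone, pvFirst_succ, hfirstnone]
                simp [hh']
              · intro j'' _ hpre'' _ _ heq
                have : j' = j'' := pvToStr_inj heq
                subst this
                apply hh
                rw [pvHit_iff, ← hm]
                exact hpre''
      have hrec := ih (t + 1) d' hinv' j hj
      rw [show pvFib (t + 1 + 1) = pvFib t + pvFib (t + 1) from rfl] at hrec
      rw [show ((t + 1 : Nat) : Int) = (t : Int) + 1 by push_cast; ring] at hrec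
      rw [show t + 1 + fuel = t + (fuel + 1) by omega] at hrec
      rw [hstep, hrec]
    · -- dict already full: early exit, lookups are stable
      have hfull : nn + 1 ≤ (d.size : Int) := by omega
      have hmem : PySem.Int.toStr (j : Int) ∈ d.keys := pvPigeon hnd hkeys hfull hj
      have hsome : (d.get? (PySem.Int.toStr (j : Int))).isSome := by
        rw [← PySem.Dict.contains_eq_isSome_get?]
        rw [PySem.Dict.contains_eq_decide_mem_keys]
        simpa using hmem
      obtain ⟨y, hy⟩ := Option.isSome_iff_exists.mp hsome
      have hy' := hget j hj
      rw [hy] at hy'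
      obtain ⟨x, hx, hxy⟩ := Option.map_eq_some_iff.mp hy'.symm
      have hres : auptonLoop nn d (pvFib t) (pvFib (t + 1)) (t : Int) (fuel + 1) = d := by
        show (if (d.size : Int) < nn + 1 then _ else d) = d
        rw [if_neg hsz]
      have hfull' : pvFirst (PySem.Int.toStr (j : Int)) 0 (t + (fuel + 1)) = some x :=
        pvFirst_mono hx (fuel + 1)
      rw [hres, hy, hfull']
      simp
      exact hxy.symm

theorem pvMain (nn : Int) : aupton nn = aupton_alt nn := by
  simp only [aupton, aupton_alt]
  have hB : auptonAll (PySem.List.pyRange 0 (nn + 1) 1) [] 0 1 []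
      = (PySem.List.pyRange 0 (nn + 1) 1).map
          (fun i => ((pvFirst (PySem.Int.toStr i) 0 20578).map Int.ofNat).getD 0) :=
    pvAll_eq (PySem.List.pyRange 0 (nn + 1) 1) 0 []
  rw [hB]
  apply List.map_congr_left
  intro i hi
  rw [PySem.List.mem_pyRange_one] at hi
  obtain ⟨hi0, hilt⟩ := hi
  set j : Nat := i.toNat with hjdef
  have hij : (j : Int) = i := Int.toNat_of_nonneg hi0
  have hj : (j : Int) ≤ nn := by omega
  rw [← hij]
  have hinv0 : pvInv nn 0 PySem.Dict.empty := by
    refine ⟨PySem.Dict.nodup_keys_empty, ?_, ?_⟩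
    · intro key hk
      simp [PySem.Dict.keys_empty] at hk
    · intro j' _
      simp [PySem.Dict.get?_empty, pvFirst]
  have hA : (auptonLoop nn PySem.Dict.empty 0 1 0 20578).get? (PySem.Int.toStr (j : Int))
      = Option.map Int.ofNat (pvFirst (PySem.Int.toStr (j : Int)) 0 (0 + 20578)) :=
    pvOuter_spec nn 20578 0 PySem.Dict.empty hinv0 j hj
  rw [PySem.Dict.getD_eq_get?_getD, hA]

-- ===== VERDICT (by name: the statement is the Claim_ definition above) =====
theorem aupton_spec : Claim_equal_aupton := by
  intro nn _
  unfold Spec_aupton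
  exact pvMain nn
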